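-- pv_equiv track=rewrite | github.com/riisatoro/dots | django-dots/api/game/find_captured.py | is_in_loop
-- ===== SOURCE A (Python) =====
-- def is_in_loop(loop, point):
--     x, y = point
--     left, right, top, bottom = 0, 0, 0, 0
--
--     for item in loop:
--         if item[0] == x and item[1] < y and left == 0:
--             left += 1
--         elif item[0] == x and item[1] > y and right == 0:
--             right += 1
--         elif item[1] == y and item[0] < x and top == 0:
--             top += 1
--         elif item[1] == y and item[0] > x and bottom == 0:
--             bottom += 1
--
--     if left+right+top+bottom == 4:
--         return True
--     return False
-- ===== SOURCE B (Python) =====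
-- def is_in_loop(loop, point):
--     x, y = point
--     ys = [py for (px, py) in loop if px == x]
--     xs = [px for (px, py) in loop if py == y]
--     if not ys or not xs:
--         return False
--     return min(ys) < y < max(ys) and min(xs) < x < max(xs)
-- ===== Notes on version B (the rewrite author's own statement) =====
-- stated objective: simpler
-- what changed: Replaces A's four-flag elif accumulator loop with a build-then-reduce shape: project the column/row coordinate lists by comprehensions, then compare min/max of each against the point.
import Mathlib
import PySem

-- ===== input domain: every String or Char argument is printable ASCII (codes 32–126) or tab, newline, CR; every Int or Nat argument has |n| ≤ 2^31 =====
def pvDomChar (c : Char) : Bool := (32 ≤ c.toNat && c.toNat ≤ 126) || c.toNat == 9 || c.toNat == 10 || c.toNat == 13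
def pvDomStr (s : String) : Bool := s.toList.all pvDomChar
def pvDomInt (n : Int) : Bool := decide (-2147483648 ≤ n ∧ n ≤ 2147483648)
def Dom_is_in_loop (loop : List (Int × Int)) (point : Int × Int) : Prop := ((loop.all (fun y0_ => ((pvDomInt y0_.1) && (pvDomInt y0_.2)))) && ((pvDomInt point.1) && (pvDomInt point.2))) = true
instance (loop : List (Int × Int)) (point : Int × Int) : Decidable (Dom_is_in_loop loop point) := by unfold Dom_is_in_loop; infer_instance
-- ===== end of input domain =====

-- B replaces A's four-flag accumulating loop by a build-then-reduce shape (project the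
-- column/row values, then compare min/max against the point); objective: simpler.

-- ===== PORT A =====
-- one iteration of A's for-loop over the flag state (left, right, top, bottom)
def isInLoopStep (x y : Int) (st : Int × Int × Int × Int) (item : Int × Int) : Int × Int × Int × Int :=
  if item.1 == x && item.2 < y && st.1 == 0 then (st.1 + 1, st.2.1, st.2.2.1, st.2.2.2)
  else if item.1 == x && item.2 > y && st.2.1 == 0 then (st.1, st.2.1 + 1, st.2.2.1, st.2.2.2)
  else if item.2 == y && item.1 < x && st.2.2.1 == 0 then (st.1, st.2.1, st.2.2.1 + 1, st.2.2.2)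
  else if item.2 == y && item.1 > x && st.2.2.2 == 0 then (st.1, st.2.1, st.2.2.1, st.2.2.2 + 1)
  else st

def is_in_loop (loop : List (Int × Int)) (point : Int × Int) : Bool :=
  let st := loop.foldl (isInLoopStep point.1 point.2) (0, 0, 0, 0)
  if st.1 + st.2.1 + st.2.2.1 + st.2.2.2 == 4 then true else false

-- ===== PORT B =====
def is_in_loop_alt (loop : List (Int × Int)) (point : Int × Int) : Bool :=
  let x := point.1
  let y := point.2
  let ys := (loop.filter (fun p => p.1 == x)).map (fun p => p.2)
  let xs := (loop.filter (fun p => p.2 == y)).map (fun p => p.1)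
  match ys, xs with
  | [], _ => false          -- Python: `if not ys or not xs: return False`
  | _, [] => false
  | y0 :: yt, x0 :: xt =>   -- Python's min/max of a nonempty list is the running fold
      (yt.foldl min y0 < y && y < yt.foldl max y0) &&
      (xt.foldl min x0 < x && x < xt.foldl max x0)

-- ===== PRECONDITION & SPEC =====
def Spec_is_in_loop (loop : List (Int × Int)) (point : Int × Int) (out : Bool) : Prop := out = is_in_loop_alt loop point
instance (loop : List (Int × Int)) (point : Int × Int) (out : Bool) : Decidable (Spec_is_in_loop loop point out) := by unfold Spec_is_in_loop; infer_instance

-- ===== CLAIM (what is proved, stated in full; the proofs are below) =====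
def Claim_equal_is_in_loop : Prop := ∀ (loop : List (Int × Int)) (point : Int × Int), Dom_is_in_loop loop point → Spec_is_in_loop loop point (is_in_loop loop point)

-- ===== LEMMAS AND PROOFS =====

def b2i (b : Bool) : Int := if b then 1 else 0

theorem isInLoopStep_char (x y : Int) (a b c d : Bool) (p : Int × Int) :
    isInLoopStep x y (b2i a, b2i b, b2i c, b2i d) p =
      (b2i (a || (p.1 == x && p.2 < y)), b2i (b || (p.1 == x && p.2 > y)),
       b2i (c || (p.2 == y && p.1 < x)), b2i (d || (p.2 == y && p.1 > x))) := by
  by_cases hx : p.1 = x <;> by_cases hy : p.2 = y <;>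
    by_cases h1 : p.2 < y <;> by_cases h2 : p.2 > y <;>
    by_cases h3 : p.1 < x <;> by_cases h4 : p.1 > x <;>
    first
      | omega
      | (cases a <;> cases b <;> cases c <;> cases d <;>
          simp [isInLoopStep, b2i, hx, hy, h1, h2, h3, h4])

theorem foldl_char (x y : Int) (loop : List (Int × Int)) (a b c d : Bool) :
    loop.foldl (isInLoopStep x y) (b2i a, b2i b, b2i c, b2i d) =
      (b2i (a || loop.any (fun p => p.1 == x && p.2 < y)),
       b2i (b || loop.any (fun p => p.1 == x && p.2 > y)),
       b2i (c || loop.any (fun p => p.2 == y && p.1 < x)),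
       b2i (d || loop.any (fun p => p.2 == y && p.1 > x))) := by
  induction loop generalizing a b c d with
  | nil => simp
  | cons p t ih =>
      simp only [List.foldl_cons, isInLoopStep_char, List.any_cons]
      rw [ih]
      simp [Bool.or_assoc]

theorem any_iff_col_lt (loop : List (Int × Int)) (x y : Int) :
    loop.any (fun p => p.1 == x && p.2 < y) = true ↔ ∃ p ∈ loop, p.1 = x ∧ p.2 < y := by
  rw [List.any_eq_true]
  constructor
  · rintro ⟨p, hp, h⟩; simp only [Bool.and_eq_true, beq_iff_eq, decide_eq_true_eq] at h
    exact ⟨p, hp, h.1, h.2⟩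
  · rintro ⟨p, hp, h1, h2⟩; exact ⟨p, hp, by simp [h1, h2]⟩

theorem any_iff_col_gt (loop : List (Int × Int)) (x y : Int) :
    loop.any (fun p => p.1 == x && p.2 > y) = true ↔ ∃ p ∈ loop, p.1 = x ∧ y < p.2 := by
  rw [List.any_eq_true]
  constructor
  · rintro ⟨p, hp, h⟩; simp only [Bool.and_eq_true, beq_iff_eq, decide_eq_true_eq] at h
    exact ⟨p, hp, h.1, h.2⟩
  · rintro ⟨p, hp, h1, h2⟩; exact ⟨p, hp, by simp [h1]; omega⟩

theorem any_iff_row_lt (loop : List (Int × Int)) (x y : Int) :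
    loop.any (fun p => p.2 == y && p.1 < x) = true ↔ ∃ p ∈ loop, p.2 = y ∧ p.1 < x := by
  rw [List.any_eq_true]
  constructor
  · rintro ⟨p, hp, h⟩; simp only [Bool.and_eq_true, beq_iff_eq, decide_eq_true_eq] at h
    exact ⟨p, hp, h.1, h.2⟩
  · rintro ⟨p, hp, h1, h2⟩; exact ⟨p, hp, by simp [h1, h2]⟩

theorem any_iff_row_gt (loop : List (Int × Int)) (x y : Int) :
    loop.any (fun p => p.2 == y && p.1 > x) = true ↔ ∃ p ∈ loop, p.2 = y ∧ x < p.1 := by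
  rw [List.any_eq_true]
  constructor
  · rintro ⟨p, hp, h⟩; simp only [Bool.and_eq_true, beq_iff_eq, decide_eq_true_eq] at h
    exact ⟨p, hp, h.1, h.2⟩
  · rintro ⟨p, hp, h1, h2⟩; exact ⟨p, hp, by simp [h1]; omega⟩

theorem is_in_loop_iff (loop : List (Int × Int)) (x y : Int) :
    is_in_loop loop (x, y) = true ↔
      ((∃ p ∈ loop, p.1 = x ∧ p.2 < y) ∧ (∃ p ∈ loop, p.1 = x ∧ y < p.2) ∧
       (∃ p ∈ loop, p.2 = y ∧ p.1 < x) ∧ (∃ p ∈ loop, p.2 = y ∧ x < p.1)) := by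
  rw [← any_iff_col_lt, ← any_iff_col_gt, ← any_iff_row_lt, ← any_iff_row_gt]
  simp only [is_in_loop]
  rw [show ((0 : Int), (0 : Int), (0 : Int), (0 : Int)) = (b2i false, b2i false, b2i false, b2i false) from rfl]
  rw [foldl_char]
  cases loop.any (fun p => p.1 == x && p.2 < y) <;>
    cases loop.any (fun p => p.1 == x && p.2 > y) <;>
    cases loop.any (fun p => p.2 == y && p.1 < x) <;>
    cases loop.any (fun p => p.2 == y && p.1 > x) <;>
    simp [b2i]

theorem mem_proj_col (loop : List (Int × Int)) (x : Int) (v : Int) :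
    v ∈ (loop.filter (fun p => p.1 == x)).map (fun p => p.2) ↔ ∃ p ∈ loop, p.1 = x ∧ p.2 = v := by
  simp only [List.mem_map, List.mem_filter, beq_iff_eq]
  constructor
  · rintro ⟨p, ⟨hp, e⟩, rfl⟩; exact ⟨p, hp, e, rfl⟩
  · rintro ⟨p, hp, e, rfl⟩; exact ⟨p, ⟨hp, e⟩, rfl⟩

theorem mem_proj_row (loop : List (Int × Int)) (y : Int) (v : Int) :
    v ∈ (loop.filter (fun p => p.2 == y)).map (fun p => p.1) ↔ ∃ p ∈ loop, p.2 = y ∧ p.1 = v := by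
  simp only [List.mem_map, List.mem_filter, beq_iff_eq]
  constructor
  · rintro ⟨p, ⟨hp, e⟩, rfl⟩; exact ⟨p, hp, e, rfl⟩
  · rintro ⟨p, hp, e, rfl⟩; exact ⟨p, ⟨hp, e⟩, rfl⟩

-- the running-min fold of a nonempty list sits below a threshold iff some element does
theorem foldl_min_lt_iff (h : Int) (t : List Int) (y : Int) :
    t.foldl min h < y ↔ ∃ v ∈ h :: t, v < y := by
  have hm : PySem.List.min? (h :: t) (fun v => v) = some (t.foldl min h) :=
    PySem.List.min?_id_cons h t
  constructor
  · intro hlt; exact ⟨t.foldl min h, PySem.List.min?_mem hm, hlt⟩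
  · rintro ⟨v, hv, hlt⟩
    have := PySem.List.min?_isMin hm v hv
    omega

theorem foldl_max_gt_iff (h : Int) (t : List Int) (y : Int) :
    y < t.foldl max h ↔ ∃ v ∈ h :: t, y < v := by
  have hm : PySem.List.max? (h :: t) (fun v => v) = some (t.foldl max h) :=
    PySem.List.max?_id_cons h t
  constructor
  · intro hlt; exact ⟨t.foldl max h, PySem.List.max?_mem hm, hlt⟩
  · rintro ⟨v, hv, hlt⟩
    have := PySem.List.max?_isMax hm v hv
    omega

theorem is_in_loop_alt_iff (loop : List (Int × Int)) (x y : Int) :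
    is_in_loop_alt loop (x, y) = true ↔
      ((∃ p ∈ loop, p.1 = x ∧ p.2 < y) ∧ (∃ p ∈ loop, p.1 = x ∧ y < p.2) ∧
       (∃ p ∈ loop, p.2 = y ∧ p.1 < x) ∧ (∃ p ∈ loop, p.2 = y ∧ x < p.1)) := by
  simp only [is_in_loop_alt]
  have memys := mem_proj_col loop x
  have memxs := mem_proj_row loop y
  rcases hys : (loop.filter (fun p => p.1 == x)).map (fun p => p.2) with _ | ⟨y0, yt⟩ <;>
    rcases hxs : (loop.filter (fun p => p.2 == y)).map (fun p => p.1) with _ | ⟨x0, xt⟩ <;>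
    rw [hys, hxs]
  · constructor
    · intro h; simp at h
    · rintro ⟨⟨p, hp, e, _⟩, _⟩
      have := (memys p.2).2 ⟨p, hp, e, rfl⟩
      rw [hys] at this; cases this
  · constructor
    · intro h; simp at h
    · rintro ⟨⟨p, hp, e, _⟩, _⟩
      have := (memys p.2).2 ⟨p, hp, e, rfl⟩
      rw [hys] at this; cases this
  · constructor
    · intro h; simp at h
    · rintro ⟨_, _, ⟨p, hp, e, _⟩, _⟩
      have := (memxs p.1).2 ⟨p, hp, e, rfl⟩
      rw [hxs] at this; cases this
  · have eys : ∀ v : Int, v ∈ y0 :: yt ↔ ∃ p ∈ loop, p.1 = x ∧ p.2 = v := by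
      intro v; rw [← hys]; exact memys v
    have exs : ∀ v : Int, v ∈ x0 :: xt ↔ ∃ p ∈ loop, p.2 = y ∧ p.1 = v := by
      intro v; rw [← hxs]; exact memxs v
    simp only [Bool.and_eq_true, decide_eq_true_eq, foldl_min_lt_iff, foldl_max_gt_iff]
    constructor
    · rintro ⟨⟨⟨v1, hv1, l1⟩, ⟨v2, hv2, l2⟩⟩, ⟨v3, hv3, l3⟩, ⟨v4, hv4, l4⟩⟩
      obtain ⟨p1, hp1, e1, rfl⟩ := (eys v1).1 hv1
      obtain ⟨p2, hp2, e2, rfl⟩ := (eys v2).1 hv2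
      obtain ⟨p3, hp3, e3, rfl⟩ := (exs v3).1 hv3
      obtain ⟨p4, hp4, e4, rfl⟩ := (exs v4).1 hv4
      exact ⟨⟨p1, hp1, e1, l1⟩, ⟨p2, hp2, e2, l2⟩, ⟨p3, hp3, e3, l3⟩, ⟨p4, hp4, e4, l4⟩⟩
    · rintro ⟨⟨p1, hp1, e1, l1⟩, ⟨p2, hp2, e2, l2⟩, ⟨p3, hp3, e3, l3⟩, ⟨p4, hp4, e4, l4⟩⟩
      exact ⟨⟨⟨p1.2, (eys p1.2).2 ⟨p1, hp1, e1, rfl⟩, l1⟩,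
              ⟨p2.2, (eys p2.2).2 ⟨p2, hp2, e2, rfl⟩, l2⟩⟩,
             ⟨p3.1, (exs p3.1).2 ⟨p3, hp3, e3, rfl⟩, l3⟩,
             ⟨p4.1, (exs p4.1).2 ⟨p4, hp4, e4, rfl⟩, l4⟩⟩

-- ===== VERDICT (by name: the statement is the Claim_ definition above) =====
theorem is_in_loop_spec : Claim_equal_is_in_loop := by
  intro loop point _
  unfold Spec_is_in_loop
  obtain ⟨x, y⟩ := point
  cases hB : is_in_loop_alt loop (x, y) with
  | true => exact (is_in_loop_iff loop x y).2 ((is_in_loop_alt_iff loop x y).1 hB)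
  | false =>
      by_contra h
      have hA : is_in_loop loop (x, y) = true := by
        cases hA' : is_in_loop loop (x, y) <;> simp_all
      have := (is_in_loop_alt_iff loop x y).2 ((is_in_loop_iff loop x y).1 hA)
      simp_all
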